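-- pv_equiv track=rewrite | github.com/ehrlich-b/research | verification/area_law_verification.py | rect_sites
-- ===== SOURCE A (Python) =====
-- def rect_sites(a, b, corner_x=0, corner_y=0, Ly=4):
--     """Return set of site indices for a x b rectangle at given corner."""
--     sites = set()
--     for dx in range(a):
--         for dy in range(b):
--             x = (corner_x + dx) % 4
--             y = (corner_y + dy) % 4
--             sites.add(x * Ly + y)
--     return sites
-- ===== SOURCE B (Python) =====
-- def rect_sites(a, b, corner_x=0, corner_y=0, Ly=4):
--     """Return set of site indices for a x b rectangle at given corner."""
--     xs = [(corner_x + dx) % 4 for dx in range(min(a, 4))]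
--     ys = [(corner_y + dy) % 4 for dy in range(min(b, 4))]
--     return {x * Ly + y for x in xs for y in ys}
-- ===== Notes on version B (the rewrite author's own statement) =====
-- stated objective: faster
-- what changed: Coordinates are taken mod 4, so only the first min(a,4) x-offsets and min(b,4) y-offsets yield distinct residues; B precomputes those two residue lists and takes their product instead of scanning the full a*b rectangle.
import Mathlib
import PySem

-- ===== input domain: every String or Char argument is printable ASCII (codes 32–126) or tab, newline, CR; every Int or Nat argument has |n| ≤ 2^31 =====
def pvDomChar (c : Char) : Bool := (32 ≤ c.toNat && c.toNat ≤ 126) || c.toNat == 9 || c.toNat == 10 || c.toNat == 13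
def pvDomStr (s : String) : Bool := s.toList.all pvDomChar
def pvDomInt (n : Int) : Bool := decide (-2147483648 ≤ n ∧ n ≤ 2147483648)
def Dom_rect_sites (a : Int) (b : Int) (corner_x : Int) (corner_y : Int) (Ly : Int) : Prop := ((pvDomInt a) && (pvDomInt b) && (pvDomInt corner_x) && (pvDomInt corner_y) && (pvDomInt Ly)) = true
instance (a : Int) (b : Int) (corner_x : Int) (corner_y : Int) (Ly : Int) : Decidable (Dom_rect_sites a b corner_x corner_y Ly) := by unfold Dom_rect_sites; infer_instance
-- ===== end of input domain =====

-- B replaces the a*b double scan by the product of the distinct x/y residues mod 4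
-- (min(a,4) and min(b,4) offsets), an O(1) computation; return value proved equal.


-- ===== PORT A =====
def rect_sites (a : Int) (b : Int) (corner_x : Int) (corner_y : Int) (Ly : Int) : List Int :=
  (PySem.List.pyRange 0 a 1).foldl (fun sites dx =>
    (PySem.List.pyRange 0 b 1).foldl (fun sites dy =>
      PySem.Set.add sites ((PySem.Int.mod (corner_x + dx) 4) * Ly + PySem.Int.mod (corner_y + dy) 4))
      sites)
    PySem.Set.empty

-- ===== PORT B =====
def rect_sites_alt (a : Int) (b : Int) (corner_x : Int) (corner_y : Int) (Ly : Int) : List Int :=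
  let xs := (PySem.List.pyRange 0 (min a 4) 1).map (fun dx => PySem.Int.mod (corner_x + dx) 4)
  let ys := (PySem.List.pyRange 0 (min b 4) 1).map (fun dy => PySem.Int.mod (corner_y + dy) 4)
  xs.foldl (fun s x => ys.foldl (fun s y => PySem.Set.add s (x * Ly + y)) s) PySem.Set.empty

-- ===== PRECONDITION & SPEC =====
def Spec_rect_sites (a : Int) (b : Int) (corner_x : Int) (corner_y : Int) (Ly : Int) (out : List Int) : Prop := out = rect_sites_alt a b corner_x corner_y Ly
instance (a : Int) (b : Int) (corner_x : Int) (corner_y : Int) (Ly : Int) (out : List Int) : Decidable (Spec_rect_sites a b corner_x corner_y Ly out) := by unfold Spec_rect_sites; infer_instance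

-- ===== CLAIM (what is proved, stated in full; the proofs are below) =====
def Claim_equal_rect_sites : Prop := ∀ (a : Int) (b : Int) (corner_x : Int) (corner_y : Int) (Ly : Int), Dom_rect_sites a b corner_x corner_y Ly → Spec_rect_sites a b corner_x corner_y Ly (rect_sites a b corner_x corner_y Ly)

-- ===== LEMMAS AND PROOFS =====

-- one step of the outer loop: absorb the whole block of sites H dx into the set
def updStep (H : Int → List Int) : List Int → Int → List Int :=
  fun s dx => PySem.Set.update s (H dx)

lemma update_of_subset (s L : List Int) (h : ∀ x ∈ L, x ∈ s) : PySem.Set.update s L = s := by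
  induction L generalizing s with
  | nil => rfl
  | cons y t ih =>
    rw [PySem.Set.update_cons, PySem.Set.add_of_mem (h y (by simp))]
    exact ih s fun x hx => h x (by simp [hx])

lemma mem_foldl_update (H : Int → List Int) (L : List Int) (s : List Int) (x : Int)
    (hx : x ∈ s) : x ∈ L.foldl (updStep H) s := by
  induction L generalizing s with
  | nil => exact hx
  | cons d t ih => exact ih _ ((PySem.Set.mem_update _ _ _).2 (Or.inl hx))

lemma mem_foldl_update_of (H : Int → List Int) (L : List Int) (s : List Int) (dx x : Int)
    (hdx : dx ∈ L) (hx : x ∈ H dx) : x ∈ L.foldl (updStep H) s := by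
  induction L generalizing s with
  | nil => simp at hdx
  | cons d t ih =>
    rcases List.mem_cons.1 hdx with h | h
    · subst h
      exact mem_foldl_update H t _ x ((PySem.Set.mem_update _ _ _).2 (Or.inr hx))
    · exact ih _ h

lemma foldl_update_id (H : Int → List Int) (L : List Int) (s : List Int)
    (h : ∀ dx ∈ L, ∀ x ∈ H dx, x ∈ s) : L.foldl (updStep H) s = s := by
  induction L with
  | nil => rfl
  | cons d t ih =>
    have hd : updStep H s d = s := update_of_subset s (H d) (h d (by simp))
    rw [List.foldl_cons, hd]
    exact ih fun dx hdx => h dx (by simp [hdx])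

lemma periodic_shift (H : Int → List Int) (hper : ∀ k, 0 ≤ k → H (k + 4) = H k) :
    ∀ (m : Nat) (r : Int), 0 ≤ r → H (r + 4 * m) = H r := by
  intro m
  induction m with
  | zero => intro r _; norm_num
  | succ m ih =>
    intro r hr
    have : r + 4 * ((m : Int) + 1) = (r + 4 * m) + 4 := by ring
    rw [Nat.cast_add, Nat.cast_one, this, hper _ (by positivity), ih r hr]

lemma periodic_mod (H : Int → List Int) (hper : ∀ k, 0 ≤ k → H (k + 4) = H k)
    (dx : Int) (hdx : 0 ≤ dx) : H dx = H (dx % 4) := by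
  have h4 : (0:Int) < 4 := by norm_num
  have hq : 0 ≤ dx / 4 := Int.ediv_nonneg hdx (le_of_lt h4)
  have hr : 0 ≤ dx % 4 := Int.emod_nonneg dx (by norm_num)
  have hdecomp : dx = dx % 4 + 4 * ((dx / 4).toNat : Int) := by
    rw [Int.toNat_of_nonneg hq]; omega
  calc H dx = H (dx % 4 + 4 * ((dx / 4).toNat : Int)) := by rw [← hdecomp]
    _ = H (dx % 4) := periodic_shift H hper _ _ hr

lemma master (H : Int → List Int) (hper : ∀ k, 0 ≤ k → H (k + 4) = H k) (n : Int) (s : List Int) :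
    (PySem.List.pyRange 0 n 1).foldl (updStep H) s
      = (PySem.List.pyRange 0 (min n 4) 1).foldl (updStep H) s := by
  rcases le_or_gt n 4 with h | h
  · rw [min_eq_left h]
  · rw [min_eq_right (le_of_lt h)]
    rw [PySem.List.pyRange_one_append 0 4 n (by norm_num) (le_of_lt h), List.foldl_append]
    apply foldl_update_id
    intro dx hdx x hx
    rw [PySem.List.mem_pyRange_one] at hdx
    rw [periodic_mod H hper dx (by omega)] at hx
    apply mem_foldl_update_of H _ s (dx % 4) x _ hx
    rw [PySem.List.mem_pyRange_one]
    exact ⟨Int.emod_nonneg dx (by norm_num), Int.emod_lt_of_pos dx (by norm_num)⟩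

lemma mod_add_four (t : Int) : PySem.Int.mod (t + 4) 4 = PySem.Int.mod t 4 := by
  rw [PySem.Int.mod_eq_emod_of_pos (by norm_num : (0:Int) < 4),
    PySem.Int.mod_eq_emod_of_pos (by norm_num : (0:Int) < 4)]
  omega

lemma rect_sites_eq_alt (a b corner_x corner_y Ly : Int) :
    rect_sites a b corner_x corner_y Ly = rect_sites_alt a b corner_x corner_y Ly := by
  unfold rect_sites rect_sites_alt
  simp only [List.foldl_map]
  -- rewrite A's inner loop to range over min b 4
  have hinner : ∀ s dx,
      (PySem.List.pyRange 0 b 1).foldl (fun s dy =>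
        PySem.Set.add s ((PySem.Int.mod (corner_x + dx) 4) * Ly + PySem.Int.mod (corner_y + dy) 4)) s
      = updStep (fun dx' => (PySem.List.pyRange 0 (min b 4) 1).map
          (fun dy => (PySem.Int.mod (corner_x + dx') 4) * Ly + PySem.Int.mod (corner_y + dy) 4)) s dx := by
    intro s dx
    have := master (fun dy => [(PySem.Int.mod (corner_x + dx) 4) * Ly + PySem.Int.mod (corner_y + dy) 4])
      (by intro k _; simp only; rw [show corner_y + (k + 4) = (corner_y + k) + 4 by ring, mod_add_four]) b s
    simp only [updStep, PySem.Set.update, List.foldl_map]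
    exact this
  calc (PySem.List.pyRange 0 a 1).foldl (fun s dx =>
        (PySem.List.pyRange 0 b 1).foldl (fun s dy =>
          PySem.Set.add s ((PySem.Int.mod (corner_x + dx) 4) * Ly + PySem.Int.mod (corner_y + dy) 4)) s)
        PySem.Set.empty
      = (PySem.List.pyRange 0 a 1).foldl (updStep (fun dx => (PySem.List.pyRange 0 (min b 4) 1).map
          (fun dy => (PySem.Int.mod (corner_x + dx) 4) * Ly + PySem.Int.mod (corner_y + dy) 4)))
        PySem.Set.empty := by
        exact PySem.List.foldl_congr_mem _ _ _ _ (fun s dx hdx => hinner s dx)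
    _ = (PySem.List.pyRange 0 (min a 4) 1).foldl (updStep (fun dx => (PySem.List.pyRange 0 (min b 4) 1).map
          (fun dy => (PySem.Int.mod (corner_x + dx) 4) * Ly + PySem.Int.mod (corner_y + dy) 4)))
        PySem.Set.empty := by
        apply master
        intro k hk
        congr 1
        funext dy
        rw [show corner_x + (k + 4) = (corner_x + k) + 4 by ring, mod_add_four]
    _ = (PySem.List.pyRange 0 (min a 4) 1).foldl (fun s dx =>
          (PySem.List.pyRange 0 (min b 4) 1).foldl (fun s dy =>
            PySem.Set.add s ((PySem.Int.mod (corner_x + dx) 4) * Ly + PySem.Int.mod (corner_y + dy) 4)) s)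
        PySem.Set.empty := by
        refine PySem.List.foldl_congr_mem _ _ _ _ (fun s dx _ => ?_)
        simp only [updStep, PySem.Set.update, List.foldl_map]

-- ===== VERDICT (by name: the statement is the Claim_ definition above) =====
theorem rect_sites_spec : Claim_equal_rect_sites := by
  intro a b corner_x corner_y Ly _
  exact rect_sites_eq_alt a b corner_x corner_y Ly
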